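-- pv_equiv track=rewrite | github.com/jamesctaggart/endonuclease_specificity | stabilized_end_seq/rend_utilities/struct_utils.py | get_first_stem_end
-- ===== SOURCE A (Python) =====
-- def get_first_stem_end(dotbracket):
--     d = 0 # d is the structural distance counting only base pairs
--     in_stem = False
--     for i,c in enumerate(dotbracket):
--         if c=='(':
--             d+=1
--             in_stem=True
--         elif c==')':
--             d-=1
--         elif c=='.' and d==0 and in_stem:  # Assuming that it won't form a full stem-loop in first 6 nt
--             return i
--     return len(dotbracket)
-- ===== SOURCE B (Python) =====
-- def get_first_stem_end(dotbracket):
--     n = len(dotbracket)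
--     # prefix-balance table: bal[i] = (# of '(') - (# of ')') among dotbracket[:i]
--     bal = [0] * (n + 1)
--     for i, c in enumerate(dotbracket):
--         bal[i + 1] = bal[i] + (1 if c == '(' else (-1 if c == ')' else 0))
--     first_open = next((i for i, c in enumerate(dotbracket) if c == '('), None)
--     if first_open is None:
--         return n
--     for i in range(first_open + 1, n):
--         if dotbracket[i] == '.' and bal[i] == 0:
--             return i
--     return n
-- ===== Notes on version B (the rewrite author's own statement) =====
-- stated objective: alternative
-- what changed: Replaces A's single-pass state machine (running depth + in_stem flag with early return) by a precomputed prefix-balance table, a search for the first opening parenthesis, and a scan of the indices after it.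
import Mathlib
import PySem

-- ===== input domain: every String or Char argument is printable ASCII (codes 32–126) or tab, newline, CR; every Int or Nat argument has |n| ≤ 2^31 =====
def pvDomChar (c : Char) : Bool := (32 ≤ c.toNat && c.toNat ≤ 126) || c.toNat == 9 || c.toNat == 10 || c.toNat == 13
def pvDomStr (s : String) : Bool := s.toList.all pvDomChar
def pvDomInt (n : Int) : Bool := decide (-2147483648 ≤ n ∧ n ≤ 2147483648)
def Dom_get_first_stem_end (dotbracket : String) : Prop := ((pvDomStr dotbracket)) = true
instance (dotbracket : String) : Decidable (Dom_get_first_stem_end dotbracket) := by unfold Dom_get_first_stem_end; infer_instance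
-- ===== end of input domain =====

-- B replaces A's one-pass state machine by a precomputed prefix-balance table, a search for the first opening parenthesis,
-- and a scan of the later indices (objective: alternative decomposition, same O(n) cost).


-- ===== PORT A =====
-- A's for-loop over enumerate(dotbracket): state d, in_stem; fallback = len(dotbracket)
def gfseLoopA : List (Int × Char) → Int → Bool → Int → Int
  | [], _, _, fallback => fallback
  | (i, c) :: rest, d, inStem, fallback =>
    if c = '(' then gfseLoopA rest (d + 1) true fallback
    else if c = ')' then gfseLoopA rest (d - 1) inStem fallback
    else if c = '.' ∧ d = 0 ∧ inStem = true then i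
    else gfseLoopA rest d inStem fallback

def get_first_stem_end (dotbracket : String) : Int :=
  gfseLoopA (PySem.List.enumerate dotbracket.toList 0) 0 false (PySem.Str.len dotbracket)

-- ===== PORT B =====
-- tail of B's bal table: gfseBal cs cur = [bal[1], …, bal[n]] given bal[0] = cur (B's first loop)
def gfseBal : List Char → Int → List Int
  | [], _ => []
  | c :: rest, cur =>
    let nxt := cur + (if c = '(' then 1 else if c = ')' then -1 else 0)
    nxt :: gfseBal rest nxt

-- B's second loop: first i in the index list with dotbracket[i]=='.' and bal[i]==0, else n
def gfseScan (cs : List Char) (bal : List Int) : List Int → Int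
  | [] => (cs.length : Int)
  | i :: rest =>
    if PySem.List.pyGetD cs i ' ' = '.' ∧ PySem.List.pyGetD bal i 0 = 0 then i
    else gfseScan cs bal rest

def get_first_stem_end_alt (dotbracket : String) : Int :=
  let cs := dotbracket.toList
  let bal : List Int := 0 :: gfseBal cs 0
  (cs.findIdx? (· == '(')).elim ((cs.length : Int))
    (fun j => gfseScan cs bal (PySem.List.pyRange ((j : Int) + 1) (cs.length : Int) 1))

-- ===== PRECONDITION & SPEC =====
def Spec_get_first_stem_end (dotbracket : String) (out : Int) : Prop := out = get_first_stem_end_alt dotbracket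
instance (dotbracket : String) (out : Int) : Decidable (Spec_get_first_stem_end dotbracket out) := by unfold Spec_get_first_stem_end; infer_instance

-- ===== CLAIM (what is proved, stated in full; the proofs are below) =====
def Claim_equal_get_first_stem_end : Prop := ∀ (dotbracket : String), Dom_get_first_stem_end dotbracket → Spec_get_first_stem_end dotbracket (get_first_stem_end dotbracket)

-- ===== LEMMAS AND PROOFS =====

-- prefix balance of a char list: (# of '(') - (# of ')')
def gfseBalOf (l : List Char) : Int :=
  (l.countP (· == '(') : Int) - (l.countP (· == ')') : Int)

lemma gfseBalOf_cons (c : Char) (l : List Char) :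
    gfseBalOf (c :: l) = (if c = '(' then (1:Int) else if c = ')' then -1 else 0) + gfseBalOf l := by
  by_cases h1 : c = '(' <;> by_cases h2 : c = ')' <;>
    simp [gfseBalOf, h1, h2] <;> omega

lemma gfseBalOf_append_singleton (l : List Char) (c : Char) :
    gfseBalOf (l ++ [c]) = gfseBalOf l + (if c = '(' then (1:Int) else if c = ')' then -1 else 0) := by
  by_cases h1 : c = '(' <;> by_cases h2 : c = ')' <;>
    simp [gfseBalOf, List.countP_append, h1, h2] <;> omega

lemma gfseBal_getD (cs : List Char) (cur : Int) (k : Nat) (hk : k ≤ cs.length) :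
    (cur :: gfseBal cs cur).getD k 0 = cur + gfseBalOf (cs.take k) := by
  induction cs generalizing cur k with
  | nil =>
    have hk0 : k = 0 := by simpa using hk
    subst hk0
    simp [gfseBalOf]
  | cons c rest ih =>
    cases k with
    | zero => simp [gfseBalOf]
    | succ k =>
      have hk' : k ≤ rest.length := by simpa using hk
      rw [List.getD_cons_succ]
      rw [show gfseBal (c :: rest) cur
            = (cur + (if c = '(' then (1:Int) else if c = ')' then -1 else 0))
              :: gfseBal rest (cur + (if c = '(' then (1:Int) else if c = ')' then -1 else 0)) from rfl]
      rw [ih _ k hk', List.take_succ_cons, gfseBalOf_cons]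
      ring

-- reference form of A's loop: structural recursion on the remaining chars, index carried explicitly
def gfseRef : List Char → Int → Int → Bool → Option Int
  | [], _, _, _ => none
  | c :: rest, i, d, b =>
    if c = '(' then gfseRef rest (i + 1) (d + 1) true
    else if c = ')' then gfseRef rest (i + 1) (d - 1) b
    else if c = '.' ∧ d = 0 ∧ b = true then some i
    else gfseRef rest (i + 1) d b

lemma loopA_eq_ref (rest : List Char) (i d : Int) (b : Bool) (fallback : Int) :
    gfseLoopA (PySem.List.enumerate rest i) d b fallback
      = (gfseRef rest i d b).getD fallback := by
  induction rest generalizing i d b with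
  | nil => simp [PySem.List.enumerate_nil, gfseLoopA, gfseRef]
  | cons c rest ih =>
    rw [PySem.List.enumerate_cons]
    simp only [gfseLoopA, gfseRef]
    split_ifs with h1 h2 h3
    · exact ih (i + 1) (d + 1) true
    · exact ih (i + 1) (d - 1) b
    · simp
    · exact ih (i + 1) d b

-- with no '(' remaining and in_stem = false, A's loop never returns an index
lemma ref_none_of_no_open (rest : List Char) (i d : Int) (h : '(' ∉ rest) :
    gfseRef rest i d false = none := by
  induction rest generalizing i d with
  | nil => rfl
  | cons c rest ih =>
    rw [List.mem_cons, not_or] at h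
    simp only [gfseRef]
    rw [if_neg (fun hc => h.1 hc.symm)]
    split_ifs with h2 h3
    · exact ih _ _ h.2
    · exact absurd h3.2.2 (by simp)
    · exact ih _ _ h.2

-- running A's loop across a '('-free prefix up to and including the first '('
lemma ref_skip_pre (pre rest : List Char) (i d : Int) (h : '(' ∉ pre) :
    gfseRef (pre ++ '(' :: rest) i d false
      = gfseRef rest (i + (pre.length : Int) + 1) (d + gfseBalOf pre + 1) true := by
  induction pre generalizing i d with
  | nil => simp [gfseRef, gfseBalOf]
  | cons c pre ih =>
    rw [List.mem_cons, not_or] at h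
    simp only [List.cons_append, gfseRef]
    rw [if_neg (fun hc => h.1 hc.symm)]
    split_ifs with h2 h3
    · rw [ih _ _ h.2, gfseBalOf_cons, List.length_cons]
      have hδ : (if c = '(' then (1:Int) else if c = ')' then -1 else 0) = -1 := by
        rw [if_neg (fun hc => h.1 hc.symm), if_pos h2]
      rw [hδ]
      congr 1 <;> push_cast <;> ring
    · exact absurd h3.2.2 (by simp)
    · rw [ih _ _ h.2, gfseBalOf_cons, List.length_cons]
      have hδ : (if c = '(' then (1:Int) else if c = ')' then -1 else 0) = 0 := by
        rw [if_neg (fun hc => h.1 hc.symm), if_neg h2]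
      rw [hδ]
      congr 1 <;> push_cast <;> ring

-- A's loop from index k (in_stem already true, d = balance of cs.take k) equals B's scan from k
lemma ref_eq_scan (cs : List Char) (rest : List Char) (k : Nat) (d : Int)
    (hrest : rest = cs.drop k) (hd : d = gfseBalOf (cs.take k)) :
    (gfseRef rest (k : Int) d true).getD (cs.length : Int)
      = gfseScan cs (0 :: gfseBal cs 0) (PySem.List.pyRange (k : Int) (cs.length : Int) 1) := by
  induction rest generalizing k d with
  | nil =>
    have hlen : cs.length ≤ k := List.drop_eq_nil_iff.mp hrest.symm
    rw [PySem.List.pyRange_one_eq_nil (by exact_mod_cast hlen)]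
    simp [gfseRef, gfseScan]
  | cons c rest ih =>
    have hk : k < cs.length := by
      by_contra hle
      have hnil : cs.drop k = [] := List.drop_eq_nil_iff.mpr (by omega)
      rw [← hrest] at hnil
      exact absurd hnil (by simp)
    have hcons : cs[k] :: cs.drop (k + 1) = c :: rest := by
      rw [List.getElem_cons_drop hk, ← hrest]
    have hc : cs[k] = c := by injection hcons
    have hdrop : cs.drop (k + 1) = rest := by injection hcons
    rw [PySem.List.pyRange_one_cons (by exact_mod_cast hk)]
    simp only [gfseScan, gfseRef]
    have e1 : PySem.List.pyGetD cs ((k : Nat) : Int) ' ' = c := by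
      rw [PySem.List.pyGetD_natCast, List.getD_eq_getElem cs ' ' hk, hc]
    have e2 : PySem.List.pyGetD (0 :: gfseBal cs 0) ((k : Nat) : Int) 0 = d := by
      rw [PySem.List.pyGetD_natCast, gfseBal_getD cs 0 k hk.le, hd]
      ring
    rw [e1, e2]
    by_cases h1 : c = '('
    · rw [if_pos h1, if_neg (by simp [h1] : ¬(c = '.' ∧ d = 0))]
      have hd' : d + 1 = gfseBalOf (cs.take (k + 1)) := by
        rw [List.take_succ_eq_append_getElem hk, gfseBalOf_append_singleton, hc, if_pos h1, ← hd]
      have h := ih (k + 1) (d + 1) hdrop.symm hd'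
      push_cast at h
      exact h
    · by_cases h2 : c = ')'
      · rw [if_neg h1, if_pos h2, if_neg (by simp [h2] : ¬(c = '.' ∧ d = 0))]
        have hd' : d - 1 = gfseBalOf (cs.take (k + 1)) := by
          rw [List.take_succ_eq_append_getElem hk, gfseBalOf_append_singleton, hc,
            if_neg h1, if_pos h2, ← hd]
          ring
        have h := ih (k + 1) (d - 1) hdrop.symm hd'
        push_cast at h
        exact h
      · by_cases h3 : c = '.' ∧ d = 0
        · rw [if_neg h1, if_neg h2, if_pos (⟨h3.1, h3.2, trivial⟩ : c = '.' ∧ d = 0 ∧ True),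
            if_pos h3]
          simp
        · rw [if_neg h1, if_neg h2, if_neg (fun hh => h3 ⟨hh.1, hh.2.1⟩), if_neg h3]
          have hd' : d = gfseBalOf (cs.take (k + 1)) := by
            rw [List.take_succ_eq_append_getElem hk, gfseBalOf_append_singleton, hc,
              if_neg h1, if_neg h2, ← hd]
            ring
          have h := ih (k + 1) d hdrop.symm hd'
          push_cast at h
          exact h

-- ===== VERDICT (by name: the statement is the Claim_ definition above) =====
theorem get_first_stem_end_spec : Claim_equal_get_first_stem_end := by
  intro s _
  unfold Spec_get_first_stem_end
  simp only [get_first_stem_end, get_first_stem_end_alt]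
  have hl : PySem.Str.len s = (s.toList.length : Int) := by simp [pysem]
  rw [hl, loopA_eq_ref]
  cases hfi : s.toList.findIdx? (· == '(') with
  | none =>
    have hnotin : '(' ∉ s.toList := by
      intro hm
      rw [List.findIdx?_eq_none_iff] at hfi
      have := hfi '(' hm
      simp at this
    rw [ref_none_of_no_open _ _ _ hnotin]
    simp [Option.elim]
  | some j =>
    have hj' := List.findIdx?_eq_some_iff_findIdx_eq.mp hfi
    have hj : j < s.toList.length := hj'.1
    have hpj : s.toList[j] = '(' := by
      have h := List.findIdx_getElem (xs := s.toList) (p := (· == '('))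
        (w := by rw [hj'.2]; exact hj)
      simp only [hj'.2] at h
      simpa using h
    have hmin : '(' ∉ s.toList.take j := by
      intro hm
      obtain ⟨i, hi, hgi⟩ := List.mem_iff_getElem.mp hm
      have hil : i < j := ((by simpa using hi) : i < j ∧ i < s.toList.length).1
      have h2 := List.not_of_lt_findIdx (p := (· == '(')) (xs := s.toList) (i := i)
        (by rw [hj'.2]; omega)
      simp [List.getElem_take] at hgi h2
      exact h2 hgi
    have hdecomp : s.toList = s.toList.take j ++ '(' :: s.toList.drop (j + 1) := by
      conv_lhs => rw [← List.take_append_drop j s.toList]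
      rw [← List.getElem_cons_drop hj, hpj]
    have hskip : gfseRef s.toList 0 0 false
        = gfseRef (s.toList.drop (j + 1)) (0 + ((s.toList.take j).length : Int) + 1)
            (0 + gfseBalOf (s.toList.take j) + 1) true := by
      conv_lhs => rw [hdecomp]
      exact ref_skip_pre _ _ _ _ hmin
    rw [hskip]
    have hlen2 : (s.toList.take j).length = j := by rw [List.length_take]; omega
    have hd' : (0:Int) + gfseBalOf (s.toList.take j) + 1 = gfseBalOf (s.toList.take (j + 1)) := by
      rw [List.take_succ_eq_append_getElem hj, gfseBalOf_append_singleton, hpj]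
      simp
    rw [hlen2, hd']
    have hidx : (0:Int) + (j:Int) + 1 = ((j + 1 : Nat) : Int) := by push_cast; ring
    rw [hidx, ref_eq_scan s.toList (s.toList.drop (j + 1)) (j + 1)
      (gfseBalOf (s.toList.take (j + 1))) rfl rfl]
    simp only [Option.elim]
    norm_cast
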